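-- pv_equiv track=rewrite | github.com/Meetchauhan07/Function | question=15,16,17.py | replace_negatives
-- ===== SOURCE A (Python) =====
-- def replace_negatives(list1, i=0):
--     if i==len(list1):
--         return list1
--     elif list1[i]<0:
--         list1[i]=0
--         return replace_negatives(list1, i+1)
--     else:
--         return replace_negatives(list1, i+1)
-- ===== SOURCE B (Python) =====
-- def replace_negatives(list1, i=0):
--     for j in range(i, len(list1)):
--         if list1[j] < 0:
--             list1[j] = 0
--     return list1
-- ===== Notes on version B (the rewrite author's own statement) =====
-- stated objective: simpler
-- what changed: Replaces the element-by-element recursion (one call frame per element) with a single in-place for-loop over range(i, len(list1)); same mutation of list1 and same returned object.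
-- crash fix: For i > len(list1) A raises IndexError (it indexes past the end before ever reaching the i == len stop), while B's empty range(i, len) makes it return list1 unchanged. — e.g. on replace_negatives([1, -2], 3): A raises IndexError, B returns [1, -2]
import Mathlib
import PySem

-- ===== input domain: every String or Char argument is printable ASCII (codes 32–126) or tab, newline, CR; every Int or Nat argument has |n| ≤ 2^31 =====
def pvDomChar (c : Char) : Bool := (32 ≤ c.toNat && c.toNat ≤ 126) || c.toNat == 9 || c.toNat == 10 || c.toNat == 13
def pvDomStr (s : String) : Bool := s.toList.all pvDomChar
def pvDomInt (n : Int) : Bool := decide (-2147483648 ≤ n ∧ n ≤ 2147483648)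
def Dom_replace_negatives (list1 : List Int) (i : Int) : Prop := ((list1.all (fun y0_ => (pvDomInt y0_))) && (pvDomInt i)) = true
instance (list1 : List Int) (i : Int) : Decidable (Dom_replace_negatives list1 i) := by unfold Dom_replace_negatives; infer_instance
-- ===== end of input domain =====

-- B replaces A's per-element recursion with one in-place loop over range(i, len(list1)) (objective: simpler).
-- A mutates list1 in place (so does B); the equivalence proved here is about the return value.


-- ===== PORT A =====
-- literal port of A's recursion; the `none` branch is Python's IndexError (excluded by Pre_)
def replace_negatives (list1 : List Int) (i : Int) : List Int :=
  if i = (list1.length : Int) then list1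
  else
    match h : PySem.List.pyGet? list1 i with
    | none => list1   -- IndexError in Python; outside Pre_
    | some v =>
      if v < 0 then
        replace_negatives (PySem.List.pySetD list1 i 0) (i + 1)
      else
        replace_negatives list1 (i + 1)
termination_by ((list1.length : Int) - i).toNat
decreasing_by
  · have hin : PySem.Raise.InRange list1.length i := by
      by_contra hc
      rw [(PySem.List.pyGet?_eq_none_iff list1 i).mpr hc] at h
      exact Option.some_ne_none v h.symm
    have hlen : (PySem.List.pySetD list1 i 0).length = list1.length := PySem.List.length_pySetD ..
    have hlt : i < (list1.length : Int) := hin.2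
    simp only [hlen]
    omega
  · have hin : PySem.Raise.InRange list1.length i := by
      by_contra hc
      rw [(PySem.List.pyGet?_eq_none_iff list1 i).mpr hc] at h
      exact Option.some_ne_none v h.symm
    have hlt : i < (list1.length : Int) := hin.2
    omega

-- ===== PORT B =====
-- port of Source B: for j in range(i, len(list1)): if list1[j] < 0: list1[j] = 0; return list1
def replace_negatives_alt (list1 : List Int) (i : Int) : List Int :=
  (PySem.List.pyRange i (list1.length : Int) 1).foldl
    (fun acc j => if PySem.List.pyGetD acc j 0 < 0 then PySem.List.pySetD acc j 0 else acc)
    list1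

-- ===== PRECONDITION & SPEC =====
-- Pre_ excludes exactly the inputs where A raises IndexError: i > len (indexes past the end) or i < -len.
def Pre_replace_negatives (list1 : List Int) (i : Int) : Prop :=
  -(list1.length : Int) ≤ i ∧ i ≤ (list1.length : Int)
instance (list1 : List Int) (i : Int) : Decidable (Pre_replace_negatives list1 i) := by
  unfold Pre_replace_negatives; infer_instance
def pvWitness_replace_negatives : List Int × Int := ([3, -1, 4, -2], 0)

-- For i > len(list1) A raises IndexError while B's empty range makes it return list1 unchanged.
def Raises_replace_negatives (list1 : List Int) (i : Int) : Prop := (list1.length : Int) < i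
instance (list1 : List Int) (i : Int) : Decidable (Raises_replace_negatives list1 i) := by
  unfold Raises_replace_negatives; infer_instance
def pvRaiseWitness_replace_negatives : List Int × Int := ([1, -2], 3)
def pvRaiseWitnessOut_replace_negatives : List Int := [1, -2]

def Spec_replace_negatives (list1 : List Int) (i : Int) (out : List Int) : Prop :=
  out = replace_negatives_alt list1 i
instance (list1 : List Int) (i : Int) (out : List Int) : Decidable (Spec_replace_negatives list1 i out) := by
  unfold Spec_replace_negatives; infer_instance

-- ===== CLAIM (what is proved, stated in full; the proofs are below) =====
def Claim_equal_replace_negatives : Prop := ∀ (list1 : List Int) (i : Int), Dom_replace_negatives list1 i → Pre_replace_negatives list1 i → Spec_replace_negatives list1 i (replace_negatives list1 i)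
def Claim_raises_replace_negatives : Prop := (∀ (list1 : List Int) (i : Int), Dom_replace_negatives list1 i → Raises_replace_negatives list1 i → ¬ Pre_replace_negatives list1 i) ∧ (Dom_replace_negatives (pvRaiseWitness_replace_negatives.1) (pvRaiseWitness_replace_negatives.2) ∧ Raises_replace_negatives (pvRaiseWitness_replace_negatives.1) (pvRaiseWitness_replace_negatives.2) ∧ replace_negatives_alt (pvRaiseWitness_replace_negatives.1) (pvRaiseWitness_replace_negatives.2) = pvRaiseWitnessOut_replace_negatives)

-- ===== LEMMAS AND PROOFS =====

lemma replace_negatives_eq_foldl (k : Nat) : ∀ (l : List Int) (i : Int),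
    ((l.length : Int) - i).toNat = k →
    -(l.length : Int) ≤ i → i ≤ (l.length : Int) →
    replace_negatives l i =
      (PySem.List.pyRange i (l.length : Int) 1).foldl
        (fun acc j => if PySem.List.pyGetD acc j 0 < 0 then PySem.List.pySetD acc j 0 else acc) l := by
  induction k with
  | zero =>
    intro l i hk h1 h2
    have : i = (l.length : Int) := by omega
    subst this
    rw [replace_negatives, PySem.List.pyRange_one_eq_nil le_rfl]
    simp
  | succ n ih =>
    intro l i hk h1 h2
    have hlt : i < (l.length : Int) := by omega
    have hin : PySem.Raise.InRange l.length i := ⟨h1, hlt⟩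
    obtain ⟨v, hv⟩ : ∃ v, PySem.List.pyGet? l i = some v := by
      cases hg : PySem.List.pyGet? l i with
      | none => exact absurd ((PySem.List.pyGet?_eq_none_iff l i).mp hg hin) id
      | some v => exact ⟨v, rfl⟩
    have hvd : PySem.List.pyGetD l i 0 = v := by
      simp [PySem.List.pyGetD, hv]
    rw [replace_negatives, if_neg (by omega),
        PySem.List.pyRange_one_cons hlt, List.foldl_cons, hvd]
    split
    · next heq => rw [hv] at heq; exact absurd heq (by simp)
    · rename_i w heq
      rw [hv] at heq
      injection heq with heq'
      subst heq'
      by_cases hneg : v < 0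
      · rw [if_pos hneg, if_pos hneg]
        have hlen : (PySem.List.pySetD l i 0).length = l.length := PySem.List.length_pySetD ..
        rw [ih (PySem.List.pySetD l i 0) (i + 1) (by rw [hlen]; omega)
              (by rw [hlen]; omega) (by rw [hlen]; omega)]
        rw [hlen]
      · rw [if_neg hneg, if_neg hneg]
        exact ih l (i + 1) (by omega) (by omega) (by omega)

-- ===== VERDICT (by name: the statement is the Claim_ definition above) =====
theorem replace_negatives_spec : Claim_equal_replace_negatives := by
  intro l i _ hpre
  unfold Spec_replace_negatives replace_negatives_alt
  exact replace_negatives_eq_foldl (((l.length : Int) - i).toNat) l i rfl hpre.1 hpre.2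

@[simp] theorem replace_negatives_raises : Claim_raises_replace_negatives := by
  unfold Claim_raises_replace_negatives
  constructor
  · intro l i _ hr hp
    exact absurd hp.2 (not_le.mpr hr)
  · exact ⟨by decide, by decide, by decide⟩
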